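-- pv_equiv track=rewrite | github.com/herolava259/Coding-Interview-Practice | PreparingCodingInterview/pythonProject/Stack/MonotonicStack/LargestRectangleInHistogram.py | calc_furthest_stick
-- ===== SOURCE A (Python) =====
-- from typing import List, Deque
-- from collections import deque
--
-- def calc_furthest_stick(heights: List[int], n: int) -> List[int]:
--     st: Deque[int] = deque()
--     indexes: List[int] = [0] * n
--     for i in range(n):
--
--         cur_h = heights[i]
--         end_i = i
--         while st and heights[st[-1]] >= cur_h:
--             end_i = st.pop()
--
--         cur_p = -1
--
--         if st:
--             cur_p = st[-1]
--
--         while cur_p+1 < end_i and heights[cur_p + 1] < cur_h: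
--             cur_p += 1
--         st.append(i)
--         indexes[i] = cur_p + 1
--
--     return indexes
-- ===== SOURCE B (Python) =====
-- def calc_furthest_stick(heights, n):
--     indexes = [0] * n
--     for i in range(n):
--         cur_h = heights[i]
--         p = i - 1
--         while p >= 0 and heights[p] >= cur_h:
--             p -= 1
--         indexes[i] = p + 1
--     return indexes
-- ===== Notes on version B (the rewrite author's own statement) =====
-- stated objective: simpler
-- what changed: Replaces the monotonic deque with its pop loop, forward re-walk and stack bookkeeping by a direct per-bar backward scan: for each i, walk p from i-1 down while heights[p] >= heights[i] and store p+1; no auxiliary data structure at all.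
import Mathlib
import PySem

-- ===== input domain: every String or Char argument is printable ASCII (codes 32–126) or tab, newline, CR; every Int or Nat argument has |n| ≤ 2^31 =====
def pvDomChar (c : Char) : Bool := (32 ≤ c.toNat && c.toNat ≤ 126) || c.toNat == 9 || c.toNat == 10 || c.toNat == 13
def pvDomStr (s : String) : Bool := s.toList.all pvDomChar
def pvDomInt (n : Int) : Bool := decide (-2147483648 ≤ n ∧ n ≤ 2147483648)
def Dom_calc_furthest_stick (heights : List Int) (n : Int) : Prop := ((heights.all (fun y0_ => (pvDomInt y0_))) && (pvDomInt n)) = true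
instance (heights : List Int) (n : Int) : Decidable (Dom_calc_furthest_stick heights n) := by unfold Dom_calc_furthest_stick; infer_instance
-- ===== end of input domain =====

-- B drops A's monotonic deque (pop loop + forward re-walk + stack) for a plain per-bar
-- backward scan computing the same previous-strictly-smaller boundary; objective: simpler.

-- heights[j]; under Pre_ every index used by either port is in [0, len), so the default is never read.
def hAt (heights : List Int) (j : Int) : Int := (PySem.List.pyGet? heights j).getD 0

-- ===== PORT A =====
-- 'while st and heights[st[-1]] >= cur_h: end_i = st.pop()'  (stack stored head = top)
def popA (heights : List Int) (cur_h : Int) : List Int → Int → List Int × Int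
  | [], e => ([], e)
  | t :: rest, e => if cur_h ≤ hAt heights t then popA heights cur_h rest t else (t :: rest, e)

-- 'while cur_p+1 < end_i and heights[cur_p + 1] < cur_h: cur_p += 1'
def walkA (heights : List Int) (cur_h end_i cur_p : Int) : Int :=
  if h : cur_p + 1 < end_i ∧ hAt heights (cur_p + 1) < cur_h then
    walkA heights cur_h end_i (cur_p + 1)
  else cur_p
termination_by (end_i - cur_p).toNat
decreasing_by omega

-- one iteration of A's for-loop; state = (st, indexes); 'cur_p = -1; if st: cur_p = st[-1]' is headD
def stepA (heights : List Int) (s : List Int × List Int) (i : Int) : List Int × List Int :=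
  let cur_h := hAt heights i
  let pr := popA heights cur_h s.1 i
  let cur_p := walkA heights cur_h pr.2 (pr.1.headD (-1))
  (i :: pr.1, s.2.set i.toNat (cur_p + 1))

def calc_furthest_stick (heights : List Int) (n : Int) : List Int :=
  ((PySem.List.pyRange 0 n 1).foldl (stepA heights) ([], List.replicate n.toNat 0)).2

-- ===== PORT B =====
-- 'p = i - 1; while p >= 0 and heights[p] >= cur_h: p -= 1'
def bscan (heights : List Int) (cur_h p : Int) : Int :=
  if h : 0 ≤ p ∧ cur_h ≤ hAt heights p then bscan heights cur_h (p - 1) else p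
termination_by (p + 1).toNat
decreasing_by omega

def stepB (heights : List Int) (indexes : List Int) (i : Int) : List Int :=
  indexes.set i.toNat (bscan heights (hAt heights i) (i - 1) + 1)

def calc_furthest_stick_alt (heights : List Int) (n : Int) : List Int :=
  (PySem.List.pyRange 0 n 1).foldl (stepB heights) (List.replicate n.toNat 0)

-- ===== PRECONDITION & SPEC =====
-- Pre_ excludes exactly the inputs where A raises IndexError (0 < n and n > len(heights)); B raises there too.
def Pre_calc_furthest_stick (heights : List Int) (n : Int) : Prop :=
  n ≤ (heights.length : Int) ∨ n ≤ 0
instance (heights : List Int) (n : Int) : Decidable (Pre_calc_furthest_stick heights n) := by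
  unfold Pre_calc_furthest_stick; infer_instance

def pvWitness_calc_furthest_stick : List Int × Int := ([2, 1, 2], 3)

def Spec_calc_furthest_stick (heights : List Int) (n : Int) (out : List Int) : Prop := out = calc_furthest_stick_alt heights n
instance (heights : List Int) (n : Int) (out : List Int) : Decidable (Spec_calc_furthest_stick heights n out) := by unfold Spec_calc_furthest_stick; infer_instance

-- ===== CLAIM (what is proved, stated in full; the proofs are below) =====
def Claim_equal_calc_furthest_stick : Prop := ∀ (heights : List Int) (n : Int), Dom_calc_furthest_stick heights n → Pre_calc_furthest_stick heights n → Spec_calc_furthest_stick heights n (calc_furthest_stick heights n)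

-- ===== LEMMAS AND PROOFS =====

theorem bscan_le (heights : List Int) (cur p : Int) : bscan heights cur p ≤ p := by
  fun_induction bscan with
  | case1 p h ih => omega
  | case2 p h => omega

theorem bscan_ge (heights : List Int) (cur p : Int) : -1 ≤ p → -1 ≤ bscan heights cur p := by
  fun_induction bscan with
  | case1 p h ih => intro _; exact ih (by omega)
  | case2 p h => intro h1; omega

theorem bscan_between (heights : List Int) (cur p : Int) :
    ∀ k, bscan heights cur p < k → k ≤ p → cur ≤ hAt heights k := by
  fun_induction bscan with
  | case1 p h ih =>
    intro k hk1 hk2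
    by_cases hk : k ≤ p - 1
    · exact ih k hk1 hk
    · have : k = p := by omega
      subst this; exact h.2
  | case2 p h => intro k hk1 hk2; exact absurd hk2 (by omega)

theorem bscan_skip (heights : List Int) (cur : Int) :
    ∀ (m : Nat) (p q : Int), (p - q).toNat ≤ m → -1 ≤ q → q ≤ p →
    (∀ k, q < k → k ≤ p → cur ≤ hAt heights k) →
    bscan heights cur p = bscan heights cur q := by
  intro m
  induction m with
  | zero => intro p q h1 h2 h3 _; exact congrArg (bscan heights cur) (by omega)
  | succ m ih =>
    intro p q h1 h2 h3 hall
    by_cases hpq : p = q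
    · rw [hpq]
    · have h0 : 0 ≤ p := by omega
      rw [bscan, dif_pos ⟨h0, hall p (by omega) (le_refl p)⟩]
      exact ih (p-1) q (by omega) h2 (by omega) (fun k hk1 hk2 => hall k hk1 (by omega))

theorem bscan_jump (heights : List Int) (cur p : Int) (h0 : 0 ≤ p) (hc : cur ≤ hAt heights p) :
    bscan heights cur p = bscan heights cur (bscan heights (hAt heights p) (p - 1)) := by
  have hr1 : -1 ≤ bscan heights (hAt heights p) (p - 1) := bscan_ge _ _ _ (by omega)
  have hr2 : bscan heights (hAt heights p) (p - 1) ≤ p - 1 := bscan_le _ _ _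
  rw [bscan, dif_pos ⟨h0, hc⟩]
  exact bscan_skip heights cur (p - 1 - bscan heights (hAt heights p) (p-1)).toNat (p-1) _
    (le_refl _) hr1 hr2
    (fun k hk1 hk2 => le_trans hc (bscan_between heights (hAt heights p) (p-1) k hk1 hk2))

def chainFrom (heights : List Int) (p : Int) : List Int :=
  if h : 0 ≤ p then p :: chainFrom heights (bscan heights (hAt heights p) (p - 1)) else []
termination_by (p + 1).toNat
decreasing_by
  have := bscan_le heights (hAt heights p) (p - 1)
  omega

theorem chain_headD (heights : List Int) (r : Int) (h : -1 ≤ r) :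
    (chainFrom heights r).headD (-1) = r := by
  rw [chainFrom]
  split
  · rfl
  · next h0 => simp only [List.headD]; omega

theorem pop_chain (heights : List Int) (cur : Int) :
    ∀ (m : Nat) (p : Int), (p + 1).toNat ≤ m → -1 ≤ p → ∀ e : Int,
      (popA heights cur (chainFrom heights p) e).1 = chainFrom heights (bscan heights cur p) ∧
      ((popA heights cur (chainFrom heights p) e).2 = e ∨
        (0 ≤ (popA heights cur (chainFrom heights p) e).2 ∧ (popA heights cur (chainFrom heights p) e).2 ≤ p)) := by
  intro m
  induction m with
  | zero =>
    intro p h1 h2 e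
    have hp : p = -1 := by omega
    subst hp
    have hc : chainFrom heights (-1) = [] := by rw [chainFrom]; exact dif_neg (by omega)
    have hb : bscan heights cur (-1) = -1 := by rw [bscan]; exact dif_neg (by rintro ⟨a, _⟩; omega)
    rw [hc, hb, hc]
    exact ⟨rfl, Or.inl rfl⟩
  | succ m ih =>
    intro p h1 h2 e
    by_cases h0 : 0 ≤ p
    · have hcp : chainFrom heights p = p :: chainFrom heights (bscan heights (hAt heights p) (p - 1)) := by
        rw [chainFrom]; exact dif_pos h0
      set r0 := bscan heights (hAt heights p) (p - 1) with hr0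
      have hr0le : r0 ≤ p - 1 := bscan_le _ _ _
      have hr0ge : -1 ≤ r0 := bscan_ge _ _ _ (by omega)
      rw [hcp]
      by_cases hcur : cur ≤ hAt heights p
      · have hpop : popA heights cur (p :: chainFrom heights r0) e = popA heights cur (chainFrom heights r0) p := by
          simp [popA, hcur]
        rw [hpop]
        have hbs : bscan heights cur p = bscan heights cur r0 := bscan_jump heights cur p h0 hcur
        rw [hbs]
        obtain ⟨ih1, ih2⟩ := ih r0 (by omega) hr0ge p
        refine ⟨ih1, Or.inr ?_⟩
        rcases ih2 with h | ⟨ha, hb⟩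
        · constructor <;> omega
        · constructor <;> omega
      · have hpop : popA heights cur (p :: chainFrom heights r0) e = (p :: chainFrom heights r0, e) := by
          simp [popA, hcur]
        rw [hpop]
        have hbs : bscan heights cur p = p := by
          rw [bscan]; exact dif_neg (by rintro ⟨_, hc2⟩; exact hcur hc2)
        rw [hbs, hcp]
        exact ⟨rfl, Or.inl rfl⟩
    · have hp : p = -1 := by omega
      subst hp
      have hc : chainFrom heights (-1) = [] := by rw [chainFrom]; exact dif_neg (by omega)
      have hb : bscan heights cur (-1) = -1 := by rw [bscan]; exact dif_neg (by rintro ⟨a, _⟩; omega)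
      rw [hc, hb, hc]
      exact ⟨rfl, Or.inl rfl⟩

theorem stepA_eq (heights : List Int) (idx : List Int) (i : Int) (hi : 0 ≤ i) :
    stepA heights (chainFrom heights (i - 1), idx) i = (chainFrom heights i, stepB heights idx i) := by
  obtain ⟨h1, h2⟩ := pop_chain heights (hAt heights i) (i - 1 + 1).toNat (i - 1) (le_refl _) (by omega) i
  set r := bscan heights (hAt heights i) (i - 1) with hr
  have hrge : -1 ≤ r := bscan_ge _ _ _ (by omega)
  have hrle : r ≤ i - 1 := bscan_le _ _ _
  have hend : (popA heights (hAt heights i) (chainFrom heights (i - 1)) i).2 ≤ i := by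
    rcases h2 with h | h <;> omega
  have hwalk : walkA heights (hAt heights i) (popA heights (hAt heights i) (chainFrom heights (i - 1)) i).2 r = r := by
    rw [walkA]
    refine dif_neg ?_
    rintro ⟨w1, w2⟩
    have := bscan_between heights (hAt heights i) (i - 1) (r + 1) (by omega) (by omega)
    omega
  have hchain : chainFrom heights i = i :: chainFrom heights r := by
    rw [chainFrom]; exact dif_pos hi
  simp only [stepA, stepB, h1, chain_headD heights r hrge, hwalk, hchain]
  rw [← hr]

theorem loop_eq (heights : List Int) (init : List Int) :
    ∀ m : Nat,
      (PySem.List.pyRange 0 (m : Int) 1).foldl (stepA heights) ([], init) =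
        (chainFrom heights ((m : Int) - 1),
          (PySem.List.pyRange 0 (m : Int) 1).foldl (stepB heights) init) := by
  intro m
  induction m with
  | zero =>
    rw [PySem.List.pyRange_one_eq_nil (by omega)]
    have hc : chainFrom heights (((0 : Nat) : Int) - 1) = [] := by
      rw [chainFrom]; exact dif_neg (by omega)
    rw [hc]; rfl
  | succ m ih =>
    have hcast : ((m + 1 : Nat) : Int) = (m : Int) + 1 := by push_cast; ring
    rw [hcast, PySem.List.pyRange_one_succ_right (by omega)]
    rw [List.foldl_append, List.foldl_append, ih]
    simp only [List.foldl_cons, List.foldl_nil]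
    have hm1 : (m : Int) + 1 - 1 = (m : Int) := by ring
    rw [hm1]
    exact stepA_eq heights _ (m : Int) (by omega)


-- ===== VERDICT (by name: the statement is the Claim_ definition above) =====
theorem calc_furthest_stick_spec : Claim_equal_calc_furthest_stick := by
  intro heights n _ _
  unfold Spec_calc_furthest_stick calc_furthest_stick calc_furthest_stick_alt
  by_cases hn : n ≤ 0
  · rw [PySem.List.pyRange_one_eq_nil hn]; rfl
  · have : n = ((n.toNat : Nat) : Int) := by omega
    rw [this, loop_eq]
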